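-- pv_equiv track=rewrite | github.com/Neochange/complexity_problems | codility1/test.py | solution
-- ===== SOURCE A (Python) =====
-- def calc_max(M):
--     max = None
--     for val in M:
--         if max == None or max < val:
--             max = val
--     return max
--
-- def solution(A):
--     # write your code in Python 3.6
--     max_val = None
--     res_pos = -1
--     curr_res_diff = -1
--     i= 0
--     while i < len(A)-1:
--         if max_val is None or max_val < A[i]:
--             max_val = A[i]
--         diff = abs(max_val - calc_max(A[i+1:]))
--
--         if (res_pos == -1) or (curr_res_diff < diff):
--             res_pos = i
--             curr_res_diff = diff
--
--         i= i + 1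
--
--     return curr_res_diff
-- ===== SOURCE B (Python) =====
-- def solution(A):
--     # O(n): precomputed suffix maxima + running prefix max, one forward pass.
--     if len(A) < 2:
--         return -1
--     suf = []
--     cur = None
--     for x in reversed(A):
--         cur = x if cur is None else max(cur, x)
--         suf.append(cur)
--     suf.reverse()
--     best = -1
--     pre = A[0]
--     for a, s in zip(A, suf[1:]):
--         pre = max(pre, a)
--         d = abs(pre - s)
--         if d > best:
--             best = d
--     return best
-- ===== Notes on version B (the rewrite author's own statement) =====
-- stated objective: faster
-- what changed: Replaced A's per-split rescan of the whole suffix (calc_max(A[i+1:]) inside the while loop) by a precomputed suffix-maxima array plus a running prefix max in one forward pass.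
import Mathlib
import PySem

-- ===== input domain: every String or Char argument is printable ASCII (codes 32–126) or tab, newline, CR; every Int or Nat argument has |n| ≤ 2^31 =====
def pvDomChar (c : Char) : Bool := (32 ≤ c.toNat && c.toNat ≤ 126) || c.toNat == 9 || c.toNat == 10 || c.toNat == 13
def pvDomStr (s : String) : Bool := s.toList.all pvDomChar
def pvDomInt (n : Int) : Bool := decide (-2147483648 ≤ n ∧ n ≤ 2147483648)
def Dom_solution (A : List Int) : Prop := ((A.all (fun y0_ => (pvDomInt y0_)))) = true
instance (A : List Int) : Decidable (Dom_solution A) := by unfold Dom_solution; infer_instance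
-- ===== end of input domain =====

-- B replaces A's quadratic rescans (calc_max of A[i+1:] at every split) by precomputed
-- suffix maxima plus a running prefix max in a single forward pass (measured faster).

-- ===== PORT A =====
-- calc_max: fold over M carrying Python's None-initialised running max
def calc_max_step (mx : Option Int) (val : Int) : Option Int :=
  match mx with
  | none => some val
  | some m => if m < val then some val else some m

def calc_max (M : List Int) : Option Int := M.foldl calc_max_step none

-- the while-loop of A: state (max_val, res_pos, curr_res_diff), index i.
-- A[i] is always in range here, and calc_max of the nonempty slice is always `some`,
-- so the .getD 0 defaults are never taken.
def solutionLoop (A : List Int) (max_val : Option Int) (res_pos curr_res_diff : Int) (i : Nat) : Int :=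
  if h : (i : Int) < (A.length : Int) - 1 then
    let ai := (PySem.List.pyGet? A (i : Int)).getD 0
    let mv : Int := match max_val with
      | none => ai
      | some m => if m < ai then ai else m
    let diff := |mv - (calc_max (PySem.List.slice A (some ((i : Int) + 1)) none)).getD 0|
    if res_pos = -1 ∨ curr_res_diff < diff then
      solutionLoop A (some mv) (i : Int) diff (i + 1)
    else
      solutionLoop A (some mv) res_pos curr_res_diff (i + 1)
  else curr_res_diff
termination_by A.length - i
decreasing_by all_goals omega

def solution (A : List Int) : Int := solutionLoop A none (-1) (-1) 0

-- ===== PORT B =====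
-- suffix running maxima (Source B's reversed scan, built back-to-front)
def sufMax : List Int → List Int
  | [] => []
  | x :: rest =>
    match sufMax rest with
    | [] => [x]
    | m :: t => max x m :: m :: t

-- Source B's forward pass over zip(A, suf[1:])
def fwdLoop (pre best : Int) : List (Int × Int) → Int
  | [] => best
  | (a, s) :: rest =>
    let pre' := max pre a
    let d := |pre' - s|
    fwdLoop pre' (if d > best then d else best) rest

def solution_alt (A : List Int) : Int :=
  if A.length < 2 then -1
  else fwdLoop (A.headD 0) (-1) (A.zip (sufMax A).tail)

-- ===== PRECONDITION & SPEC =====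
def Spec_solution (A : List Int) (out : Int) : Prop := out = solution_alt A
instance (A : List Int) (out : Int) : Decidable (Spec_solution A out) := by unfold Spec_solution; infer_instance

-- ===== CLAIM (what is proved, stated in full; the proofs are below) =====
def Claim_equal_solution : Prop := ∀ (A : List Int), Dom_solution A → Spec_solution A (solution A)

-- ===== LEMMAS AND PROOFS =====

lemma calc_max_step_some (m v : Int) : calc_max_step (some m) v = some (max m v) := by
  simp only [calc_max_step]
  split <;> congr 1 <;> omega

lemma calc_max_foldl_some (xs : List Int) (m : Int) :
    xs.foldl calc_max_step (some m) = some (xs.foldl max m) := by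
  induction xs generalizing m with
  | nil => rfl
  | cons x xs ih => simp [calc_max_step_some, ih]

lemma calc_max_cons (x : Int) (xs : List Int) :
    calc_max (x :: xs) = some (xs.foldl max x) := by
  simp [calc_max, List.foldl_cons, calc_max_step, calc_max_foldl_some]

lemma sufMax_cons (x : Int) (xs : List Int) :
    sufMax (x :: xs) = (xs.foldl max x) :: sufMax xs := by
  induction xs generalizing x with
  | nil => rfl
  | cons y r ih =>
    show (match sufMax (y :: r) with
          | [] => [x]
          | m :: t => max x m :: m :: t) = _
    rw [ih y]
    simp only [List.foldl_cons]
    rw [List.foldl_assoc (op := max)]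

lemma pyGetD_of_drop (A : List Int) (i : Nat) (a : Int) (l : List Int)
    (h : A.drop i = a :: l) : (PySem.List.pyGet? A (i : Int)).getD 0 = a := by
  have hi : A[i]? = some a := by
    rw [← List.head?_drop, h]; rfl
  rw [PySem.List.pyGet?_natCast]
  simp [hi]

lemma loop_eq (A : List Int) (l : List Int) :
    ∀ (i : Nat) (pre best rp : Int), A.drop i = l → (rp = -1 → best < 0) →
      solutionLoop A (some pre) rp best i = fwdLoop pre best (l.zip (sufMax l).tail) := by
  induction l with
  | nil =>
    intro i pre best rp hdrop _
    have hlen : A.length ≤ i := by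
      have := congrArg List.length hdrop; simp at this; omega
    rw [solutionLoop]
    simp only [dif_neg (by omega : ¬ ((i : Int) < (A.length : Int) - 1))]
    rfl
  | cons a l' ih =>
    intro i pre best rp hdrop hrp
    have hlen : A.length - i = l'.length + 1 := by
      have := congrArg List.length hdrop; simp at this; omega
    have hi : i < A.length := by omega
    cases l' with
    | nil =>
      have hne : ¬ ((i : Int) < (A.length : Int) - 1) := by
        simp only [List.length_nil] at hlen; omega
      rw [solutionLoop]
      simp only [dif_neg hne]
      rfl
    | cons b r =>
      have hcond : (i : Int) < (A.length : Int) - 1 := by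
        simp only [List.length_cons] at hlen; omega
      have hdrop' : A.drop (i + 1) = b :: r := by
        rw [← List.tail_drop, hdrop]; rfl
      rw [solutionLoop]
      simp only [dif_pos hcond]
      rw [pyGetD_of_drop A i a (b :: r) hdrop]
      have hslice : PySem.List.slice A (some ((i : Int) + 1)) none = b :: r := by
        have : ((i : Int) + 1) = ((i + 1 : Nat) : Int) := by push_cast; ring
        rw [this, PySem.List.slice_from_natCast, hdrop']
      rw [hslice, calc_max_cons]
      simp only [Option.getD_some]
      set M := r.foldl max b with hM
      have hmv : (if pre < a then a else pre) = max pre a := by split <;> omega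
      have hd : (0 : Int) ≤ |max pre a - M| := abs_nonneg _
      -- right-hand side: one step of fwdLoop
      have hrhs : fwdLoop pre best ((a :: b :: r).zip (sufMax (a :: b :: r)).tail)
          = fwdLoop (max pre a) (if |max pre a - M| > best then |max pre a - M| else best)
              ((b :: r).zip (sufMax (b :: r)).tail) := by
        rw [sufMax_cons a (b :: r)]
        simp only [List.tail_cons]
        rw [sufMax_cons b r, ← hM]
        rfl
      rw [hrhs]
      by_cases hlt : best < |max pre a - M|
      · have : rp = -1 ∨ best < |max pre a - M| := Or.inr hlt
        simp only [if_pos this, hmv]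
        rw [ih (i + 1) (max pre a) (|max pre a - M|) (i : Int) hdrop' (by intro h; omega)]
        simp only [if_pos (by omega : |max pre a - M| > best)]
      · have : ¬ (rp = -1 ∨ best < |max pre a - M|) := by
          rintro (h | h)
          · exact hlt (lt_of_lt_of_le (hrp h) hd)
          · exact hlt h
        simp only [if_neg this, hmv]
        rw [ih (i + 1) (max pre a) best rp hdrop' hrp]
        simp only [if_neg (by omega : ¬ |max pre a - M| > best)]

-- ===== VERDICT (by name: the statement is the Claim_ definition above) =====
theorem solution_spec : Claim_equal_solution := by
  intro A _
  show solution A = solution_alt A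
  match A with
  | [] => rw [solution, solutionLoop]; norm_num [solution_alt]
  | [a] => rw [solution, solutionLoop]; norm_num [solution_alt]
  | a :: b :: r =>
    rw [solution, solutionLoop]
    have hcond : ((0 : Nat) : Int) < ((a :: b :: r).length : Int) - 1 := by
      norm_num
    simp only [dif_pos hcond]
    rw [pyGetD_of_drop (a :: b :: r) 0 a (b :: r) rfl]
    have hslice : PySem.List.slice (a :: b :: r) (some (((0 : Nat) : Int) + 1)) none = b :: r := by
      have : (((0 : Nat) : Int) + 1) = ((1 : Nat) : Int) := by norm_num
      rw [this, PySem.List.slice_from_natCast]; rfl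
    rw [hslice, calc_max_cons]
    simp only [Option.getD_some]
    set M := r.foldl max b with hM
    simp only [true_or, if_true]
    rw [loop_eq (a :: b :: r) (b :: r) (0 + 1) a (|a - M|) ((0 : Nat) : Int) rfl (by intro h; omega)]
    -- unfold one step of B's loop
    show _ = solution_alt (a :: b :: r)
    rw [solution_alt]
    simp only [if_neg (by simp : ¬ (a :: b :: r).length < 2)]
    rw [sufMax_cons a (b :: r)]
    simp only [List.headD, List.tail_cons]
    rw [sufMax_cons b r, ← hM]
    show fwdLoop a |a - M| ((b :: r).zip (sufMax r))
      = fwdLoop (max a a) (if |max a a - M| > -1 then |max a a - M| else -1) ((b :: r).zip (sufMax r))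
    have hmaxaa : max a a = a := by omega
    rw [hmaxaa, if_pos (by have := abs_nonneg (a - M); omega : |a - M| > -1)]
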